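-- pv_equiv track=rewrite | github.com/murasamadsp/selvbosetting | bosetting_probability_2026.py | find_target_column
-- ===== SOURCE A (Python) =====
-- from typing import List, Optional
--
-- def find_target_column(headers: List[str]) -> Optional[int]:
--     target_hints = [
--         "antall personer kommunen har vedtatt a",
--         "kommunen har vedtatt a",
--         "antall personer kommunen har vedtatt",
--         "har vedtatt",
--     ]
--     h_lower = [h.lower() for h in headers]
--     for i, header in enumerate(h_lower):
--         if "har vedtatt" in header and "bosette" in header:
--             return i
--     for needle in target_hints:
--         for i, header in enumerate(h_lower):
--             if needle in header:
--                 return i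
--     # fallback: second column in a kommune table
--     if len(h_lower) > 1:
--         return 1
--     return None
-- ===== SOURCE B (Python) =====
-- from typing import List, Optional
--
-- def find_target_column(headers: List[str]) -> Optional[int]:
--     target_hints = [
--         "antall personer kommunen har vedtatt a",
--         "kommunen har vedtatt a",
--         "antall personer kommunen har vedtatt",
--         "har vedtatt",
--     ]
--     hl = [h.lower() for h in headers]
--     for i, h in enumerate(hl):
--         if "har vedtatt" in h and "bosette" in h:
--             return i
--     # single pass over the headers: pick the candidate with the best
--     # (hint priority, position), i.e. the lexicographic minimum
--     best = None
--     for i, h in enumerate(hl):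
--         for r, needle in enumerate(target_hints):
--             if needle in h:
--                 if best is None or (r, i) < best:
--                     best = (r, i)
--                 break
--     if best is not None:
--         return best[1]
--     # fallback: second column in a kommune table
--     return 1 if len(hl) > 1 else None
-- ===== Notes on version B (the rewrite author's own statement) =====
-- stated objective: alternative
-- what changed: Replaces the hint-major rescans of the whole header list (one full scan per hint) with a single pass over the headers that keeps the lexicographically minimal (hint-priority, index) candidate.
import Mathlib
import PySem

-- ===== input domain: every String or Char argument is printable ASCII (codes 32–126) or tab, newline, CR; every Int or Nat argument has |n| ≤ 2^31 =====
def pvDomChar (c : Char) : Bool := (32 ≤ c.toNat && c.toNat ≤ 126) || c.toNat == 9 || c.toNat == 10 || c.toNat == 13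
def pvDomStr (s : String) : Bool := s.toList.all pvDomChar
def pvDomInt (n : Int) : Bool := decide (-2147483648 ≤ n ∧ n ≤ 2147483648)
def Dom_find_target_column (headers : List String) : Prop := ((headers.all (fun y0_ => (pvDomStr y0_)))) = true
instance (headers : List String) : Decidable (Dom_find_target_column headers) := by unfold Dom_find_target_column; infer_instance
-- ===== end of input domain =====

-- B replaces A's hint-major rescans (one full header scan per hint) by a single
-- header pass tracking the lexicographically minimal (hint-priority, index)
-- candidate; alternative decomposition, similar cost.

-- ===== PORT A =====
def pvHintsA : List String :=
  ["antall personer kommunen har vedtatt a",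
   "kommunen har vedtatt a",
   "antall personer kommunen har vedtatt",
   "har vedtatt"]

-- first loop: first header containing both "har vedtatt" and "bosette"
def pvScanBoth : List String → Option Nat
  | [] => none
  | h :: t =>
    if PySem.Str.isIn "har vedtatt" h && PySem.Str.isIn "bosette" h then some 0
    else (pvScanBoth t).map (· + 1)

-- inner loop of the second pass: first header containing needle
def pvScanNeedle (needle : String) : List String → Option Nat
  | [] => none
  | h :: t =>
    if PySem.Str.isIn needle h then some 0
    else (pvScanNeedle needle t).map (· + 1)

-- outer loop of the second pass: over the hints in order
def pvHintLoop : List String → List String → Option Nat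
  | [], _ => none
  | n :: ns, hs =>
    match pvScanNeedle n hs with
    | some i => some i
    | none => pvHintLoop ns hs

def find_target_column (headers : List String) : Option Int :=
  match pvScanBoth (headers.map PySem.Str.lower) with
  | some i => some (i : Int)
  | none =>
    match pvHintLoop pvHintsA (headers.map PySem.Str.lower) with
    | some i => some (i : Int)
    | none => if (headers.map PySem.Str.lower).length > 1 then some 1 else none

-- ===== PORT B =====
-- inner 'for r, needle …: if needle in h: … break' — first (smallest) matching priority
def pvRank (h : String) : List String → Option Nat
  | [] => none
  | n :: ns =>
    if PySem.Str.isIn n h then some 0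
    else (pvRank h ns).map (· + 1)

-- the single pass: 'for i, h in enumerate(hl): … best = min', index carried explicitly
def pvBestLoop (hints : List String) : Nat → Option (Nat × Nat) → List String → Option (Nat × Nat)
  | _, best, [] => best
  | i, best, h :: t =>
    pvBestLoop hints (i + 1)
      (match pvRank h hints with
       | none => best
       | some r =>
         match best with
         | none => some (r, i)
         | some b => if r < b.1 ∨ (r = b.1 ∧ i < b.2) then some (r, i) else some b) t

def find_target_column_alt (headers : List String) : Option Int :=
  match (headers.map PySem.Str.lower).findIdx?
      (fun h => PySem.Str.isIn "har vedtatt" h && PySem.Str.isIn "bosette" h) with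
  | some i => some (i : Int)
  | none =>
    match pvBestLoop pvHintsA 0 none (headers.map PySem.Str.lower) with
    | some p => some (p.2 : Int)
    | none => if (headers.map PySem.Str.lower).length > 1 then some 1 else none

-- ===== PRECONDITION & SPEC =====
def Spec_find_target_column (headers : List String) (out : Option Int) : Prop := out = find_target_column_alt headers
instance (headers : List String) (out : Option Int) : Decidable (Spec_find_target_column headers out) := by unfold Spec_find_target_column; infer_instance

-- ===== CLAIM (what is proved, stated in full; the proofs are below) =====
def Claim_equal_find_target_column : Prop := ∀ (headers : List String), Dom_find_target_column headers → Spec_find_target_column headers (find_target_column headers)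

-- ===== LEMMAS AND PROOFS =====

theorem pvScanBoth_eq_findIdx (hs : List String) :
    pvScanBoth hs = hs.findIdx? (fun h => PySem.Str.isIn "har vedtatt" h && PySem.Str.isIn "bosette" h) := by
  induction hs with
  | nil => rfl
  | cons h t ih => simp [pvScanBoth, List.findIdx?_cons, ih]

-- lexicographic min on Option (Nat × Nat), left wins ties
def pvMin (a b : Option (Nat × Nat)) : Option (Nat × Nat) :=
  match a, b with
  | none, b => b
  | a, none => a
  | some x, some y => if y.1 < x.1 ∨ (y.1 = x.1 ∧ y.2 < x.2) then some y else some x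

-- the minimum candidate over hs with indices starting at i (proof-side spec of pvBestLoop)
def pvMinCand (hints : List String) : Nat → List String → Option (Nat × Nat)
  | _, [] => none
  | i, h :: t =>
    match pvRank h hints with
    | none => pvMinCand hints (i + 1) t
    | some r => pvMin (some (r, i)) (pvMinCand hints (i + 1) t)

theorem pvMin_assoc (a b c : Option (Nat × Nat)) :
    pvMin (pvMin a b) c = pvMin a (pvMin b c) := by
  rcases a with _ | ⟨a1, a2⟩ <;> rcases b with _ | ⟨b1, b2⟩ <;> rcases c with _ | ⟨c1, c2⟩ <;>
    simp only [pvMin] <;> split_ifs <;> (try simp only [pvMin]) <;> (try split_ifs) <;>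
    first
      | rfl
      | (simp only [Option.some.injEq, Prod.mk.injEq]; omega)

theorem pvBestLoop_eq (hints : List String) (hs : List String) :
    ∀ (i : Nat) (best : Option (Nat × Nat)),
      pvBestLoop hints i best hs = pvMin best (pvMinCand hints i hs) := by
  induction hs with
  | nil => intro i best; cases best <;> rfl
  | cons h t ih =>
    intro i best
    rw [pvBestLoop, pvMinCand]
    cases hr : pvRank h hints with
    | none => simp only [ih]
    | some r =>
      have hstep :
          (match best with
           | none => some (r, i)
           | some b => if r < b.1 ∨ (r = b.1 ∧ i < b.2) then some (r, i) else some b)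
          = pvMin best (some (r, i)) := by
        cases best with
        | none => rfl
        | some b => rfl
      simp only [hstep, ih, pvMin_assoc]

theorem pvMinCand_nil_hints (hs : List String) (i : Nat) : pvMinCand [] i hs = none := by
  induction hs generalizing i with
  | nil => rfl
  | cons h t ih => simp [pvMinCand, pvRank, ih]

theorem pvMinCand_idx_ge (hints : List String) (hs : List String) :
    ∀ (i : Nat) (p : Nat × Nat), pvMinCand hints i hs = some p → i ≤ p.2 := by
  induction hs with
  | nil => intro i p h; simp [pvMinCand] at h
  | cons x t ih =>
    intro i p h
    rw [pvMinCand] at h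
    cases hr : pvRank x hints with
    | none =>
      rw [hr] at h
      have := ih (i + 1) p h
      omega
    | some r =>
      rw [hr] at h
      cases ht : pvMinCand hints (i + 1) t with
      | none =>
        rw [ht] at h
        simp only [pvMin] at h
        cases h
        simp
      | some q =>
        have hq := ih (i + 1) q ht
        rw [ht] at h
        simp only [pvMin] at h
        split_ifs at h
        · cases h; omega
        · cases h; simp

theorem pvMinCand_cons_hit {n : String} (ns : List String) {hs : List String} :
    ∀ {i j : Nat}, pvScanNeedle n hs = some j →
      pvMinCand (n :: ns) i hs = some (0, i + j) := by
  induction hs with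
  | nil => intro i j h; simp [pvScanNeedle] at h
  | cons x t ih =>
    intro i j h
    by_cases hx : PySem.Chars.isIn n.toList x.toList = true
    · simp [pvScanNeedle, hx] at h
      subst h
      rw [pvMinCand]
      have hrk : pvRank x (n :: ns) = some 0 := by simp [pvRank, hx]
      rw [hrk]
      cases ht : pvMinCand (n :: ns) (i + 1) t with
      | none => simp [pvMin]
      | some q =>
        have hq := pvMinCand_idx_ge (n :: ns) t (i + 1) q ht
        simp only [pvMin]
        split_ifs with hc
        · exfalso; omega
        · simp
    · simp [pvScanNeedle, hx] at h
      obtain ⟨j0, hj0, rfl⟩ := h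
      rw [pvMinCand]
      have hrk : pvRank x (n :: ns) = (pvRank x ns).map (· + 1) := by simp [pvRank, hx]
      rw [hrk, ih hj0]
      cases pvRank x ns with
      | none =>
        simp only [Option.map_none]
        have he : i + 1 + j0 = i + (j0 + 1) := by omega
        rw [he]
      | some r =>
        simp only [Option.map_some, pvMin]
        rw [if_pos (Or.inl (Nat.succ_pos r))]
        have he : i + 1 + j0 = i + (j0 + 1) := by omega
        rw [he]

theorem pvMin_shift (a b : Option (Nat × Nat)) :
    pvMin (a.map (fun p => (p.1 + 1, p.2))) (b.map (fun p => (p.1 + 1, p.2)))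
      = (pvMin a b).map (fun p => (p.1 + 1, p.2)) := by
  rcases a with _ | ⟨a1, a2⟩ <;> rcases b with _ | ⟨b1, b2⟩ <;>
    simp only [Option.map_some, Option.map_none, pvMin] <;>
    split_ifs <;>
    first
      | rfl
      | (exfalso; omega)

theorem pvMinCand_cons_miss {n : String} (ns : List String) {hs : List String}
    (h : pvScanNeedle n hs = none) :
    ∀ (i : Nat), pvMinCand (n :: ns) i hs = (pvMinCand ns i hs).map (fun p => (p.1 + 1, p.2)) := by
  induction hs with
  | nil => intro i; rfl
  | cons x t ih =>
    intro i
    by_cases hx : PySem.Chars.isIn n.toList x.toList = true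
    · simp [pvScanNeedle, hx] at h
    · simp [pvScanNeedle, hx] at h
      rw [pvMinCand, pvMinCand]
      have hrk : pvRank x (n :: ns) = (pvRank x ns).map (· + 1) := by simp [pvRank, hx]
      rw [hrk, ih h]
      cases pvRank x ns with
      | none => rfl
      | some r => exact pvMin_shift (some (r, i)) (pvMinCand ns (i + 1) t)

theorem pvHintLoop_eq_minCand (hints hs : List String) :
    pvHintLoop hints hs = (pvMinCand hints 0 hs).map Prod.snd := by
  induction hints with
  | nil => simp [pvHintLoop, pvMinCand_nil_hints]
  | cons n ns ih =>
    cases hscan : pvScanNeedle n hs with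
    | some j =>
      rw [pvHintLoop, hscan, pvMinCand_cons_hit ns hscan]
      simp
    | none =>
      rw [pvHintLoop, hscan, pvMinCand_cons_miss ns hscan, ih]
      cases pvMinCand ns 0 hs with
      | none => rfl
      | some p => rfl

-- ===== VERDICT (by name: the statement is the Claim_ definition above) =====
theorem find_target_column_spec : Claim_equal_find_target_column := by
  intro headers _
  unfold Spec_find_target_column find_target_column find_target_column_alt
  rw [pvScanBoth_eq_findIdx]
  cases (headers.map PySem.Str.lower).findIdx?
      (fun h => PySem.Str.isIn "har vedtatt" h && PySem.Str.isIn "bosette" h) with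
  | some i => rfl
  | none =>
    rw [pvHintLoop_eq_minCand, pvBestLoop_eq]
    cases pvMinCand pvHintsA 0 (headers.map PySem.Str.lower) with
    | none => rfl
    | some p => rfl
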